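-- pv_equiv track=rewrite | github.com/Stxle2/cortex-nano | src/cortex_nano/transcripts.py | transcript_to_blocks
-- ===== SOURCE A (Python) =====
-- def transcript_to_blocks(turns):
--     blocks = []
--     cur = []
--     for turn in turns:
--         cur.append(f"{turn['role'].upper()}: {turn['content']}")
--         if len(cur) >= 4:
--             blocks.append('\n\n'.join(cur))
--             cur = []
--     if cur:
--         blocks.append('\n\n'.join(cur))
--     return blocks
-- ===== SOURCE B (Python) =====
-- def transcript_to_blocks(turns):
--     formatted = [f"{t['role'].upper()}: {t['content']}" for t in turns]
--
--     def chunk(fs):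
--         if not fs:
--             return []
--         return ['\n\n'.join(fs[:4])] + chunk(fs[4:])
--
--     return chunk(formatted)
-- ===== Notes on version B (the rewrite author's own statement) =====
-- stated objective: simpler
-- what changed: B formats all turns in one comprehension and then groups the precomputed list into blocks of four by recursive slicing, replacing A's interleaved accumulator-and-flush loop.
import Mathlib
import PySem

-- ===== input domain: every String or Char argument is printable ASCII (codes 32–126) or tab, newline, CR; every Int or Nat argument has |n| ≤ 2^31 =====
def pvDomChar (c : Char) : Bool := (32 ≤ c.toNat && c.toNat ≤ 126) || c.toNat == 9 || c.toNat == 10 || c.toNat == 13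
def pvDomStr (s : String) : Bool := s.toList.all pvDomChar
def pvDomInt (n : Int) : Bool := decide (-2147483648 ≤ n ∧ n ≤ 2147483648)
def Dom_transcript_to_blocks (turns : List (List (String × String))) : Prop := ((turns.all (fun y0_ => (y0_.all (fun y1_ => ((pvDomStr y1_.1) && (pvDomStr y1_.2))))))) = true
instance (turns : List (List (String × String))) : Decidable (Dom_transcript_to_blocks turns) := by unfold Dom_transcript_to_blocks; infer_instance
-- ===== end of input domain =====

-- B replaces A's accumulator-and-flush loop by a two-pass decomposition (format all turns, then
-- recursively chunk the list into fours); objective: simpler.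

-- dict lookup on the assoc-list representation: first matching key (exact for a Python dict,
-- whose keys are unique)
def lookup? (t : List (String × String)) (k : String) : Option String :=
  (t.find? (fun p => p.1 == k)).map (·.2)

-- f"{turn['role'].upper()}: {turn['content']}" — under Pre_ both keys are present, so getD's
-- default is never used (a missing key is a KeyError, excluded by Pre_).
def fmtTurn (turn : List (String × String)) : String :=
  PySem.Str.upper ((lookup? turn "role").getD "") ++ ": " ++ (lookup? turn "content").getD ""

-- ===== PORT A =====
-- loop body: cur.append(...); if len(cur) >= 4: blocks.append('\n\n'.join(cur)); cur = []
def stepA (p : List String × List String) (turn : List (String × String)) :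
    List String × List String :=
  let cur := p.2 ++ [fmtTurn turn]
  if 4 ≤ cur.length then (p.1 ++ [PySem.Str.join "\n\n" cur], ([] : List String))
  else (p.1, cur)

def transcript_to_blocks (turns : List (List (String × String))) : List String :=
  let st := turns.foldl stepA ([], [])
  if st.2 ≠ [] then st.1 ++ [PySem.Str.join "\n\n" st.2] else st.1

-- ===== PORT B =====
-- chunk(fs): [] if empty else ['\n\n'.join(fs[:4])] + chunk(fs[4:])  (slices with
-- nonnegative literal bounds are exactly take/drop)
def chunkB : List String → List String
  | [] => []
  | f :: rest =>
      PySem.Str.join "\n\n" ((f :: rest).take 4) :: chunkB ((f :: rest).drop 4)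
  termination_by fs => fs.length
  decreasing_by simp

def transcript_to_blocks_alt (turns : List (List (String × String))) : List String :=
  chunkB (turns.map fmtTurn)

-- ===== PRECONDITION & SPEC =====
-- Pre_ excludes exactly the turns missing a 'role' or 'content' key, on which A raises KeyError.
def Pre_transcript_to_blocks (turns : List (List (String × String))) : Prop :=
  ∀ t ∈ turns, (lookup? t "role").isSome ∧ (lookup? t "content").isSome
instance (turns : List (List (String × String))) : Decidable (Pre_transcript_to_blocks turns) := by
  unfold Pre_transcript_to_blocks; infer_instance

def pvWitness_transcript_to_blocks : (List (List (String × String))) :=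
  [[("role", "user"), ("content", "hi")], [("role", "assistant"), ("content", "yo")]]

def Spec_transcript_to_blocks (turns : List (List (String × String))) (out : List String) : Prop := out = transcript_to_blocks_alt turns
instance (turns : List (List (String × String))) (out : List String) : Decidable (Spec_transcript_to_blocks turns out) := by unfold Spec_transcript_to_blocks; infer_instance

-- ===== CLAIM (what is proved, stated in full; the proofs are below) =====
def Claim_equal_transcript_to_blocks : Prop := ∀ (turns : List (List (String × String))), Dom_transcript_to_blocks turns → Pre_transcript_to_blocks turns → Spec_transcript_to_blocks turns (transcript_to_blocks turns)

-- ===== LEMMAS AND PROOFS =====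

-- the defining equations of chunkB (well-founded recursion, so cited by eq_def)
lemma chunkB_nil : chunkB [] = [] := by rw [chunkB.eq_def]

lemma chunkB_cons (f : String) (rest : List String) :
    chunkB (f :: rest) =
      PySem.Str.join "\n\n" ((f :: rest).take 4) :: chunkB ((f :: rest).drop 4) := by
  rw [chunkB.eq_def]

-- a four-element prefix splits off as one chunk
lemma chunkB_four (a b c d : String) (xs : List String) :
    chunkB (a :: b :: c :: d :: xs) =
      PySem.Str.join "\n\n" [a, b, c, d] :: chunkB xs := by
  rw [chunkB_cons]; simp

-- a nonempty list of at most four elements is a single chunk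
lemma chunkB_short (l : List String) (h0 : l ≠ []) (h4 : l.length ≤ 4) :
    chunkB l = [PySem.Str.join "\n\n" l] := by
  rcases l with _ | ⟨a, _ | ⟨b, _ | ⟨c, _ | ⟨d, t⟩⟩⟩⟩
  · exact absurd rfl h0
  case cons.cons.cons.cons =>
    have ht : t = [] := by cases t <;> simp_all <;> omega
    subst ht; rw [chunkB_cons]; simp [chunkB_nil]
  all_goals rw [chunkB_cons]; simp [chunkB_nil]

-- loop invariant: with fewer than four pending items, finishing A's loop equals the
-- already-emitted blocks followed by chunking the pending items plus the rest
lemma loop_eq_chunk (fs : List (List (String × String))) (blocks cur : List String)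
    (h : cur.length ≤ 3) :
    (let st := fs.foldl stepA (blocks, cur)
     if st.2 ≠ [] then st.1 ++ [PySem.Str.join "\n\n" st.2] else st.1)
      = blocks ++ chunkB (cur ++ fs.map fmtTurn) := by
  induction fs generalizing blocks cur with
  | nil =>
      simp only [List.foldl_nil, List.map_nil, List.append_nil]
      by_cases hc : cur = []
      · simp [hc, chunkB_nil]
      · simp only [hc, ne_eq, not_false_eq_true, if_true]
        rw [chunkB_short cur hc (by omega)]
  | cons t rest ih =>
      simp only [List.foldl_cons, List.map_cons]
      by_cases hlen : cur.length = 3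
      · have hstep : stepA (blocks, cur) t =
            (blocks ++ [PySem.Str.join "\n\n" (cur ++ [fmtTurn t])], ([] : List String)) := by
          simp [stepA, hlen]
        rw [hstep, ih _ _ (by simp)]
        obtain ⟨a, b, c, rfl⟩ := List.length_eq_three.mp hlen
        simp [chunkB_four]
      · have hstep : stepA (blocks, cur) t = (blocks, cur ++ [fmtTurn t]) := by
          simp only [stepA]
          rw [if_neg (by simp; omega)]
        rw [hstep, ih _ _ (by simp; omega)]
        simp

-- ===== VERDICT (by name: the statement is the Claim_ definition above) =====
theorem transcript_to_blocks_spec : Claim_equal_transcript_to_blocks := by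
  intro turns _ _
  unfold Spec_transcript_to_blocks transcript_to_blocks transcript_to_blocks_alt
  simpa using loop_eq_chunk turns [] [] (by simp)
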